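-- pv_equiv track=rewrite | github.com/nragland37/aoc | src/2023/src/day03/part2.py | is_gear
-- ===== SOURCE A (Python) =====
-- def find_full_number(grid, row, col, direction):
--     # Extracts the full number starting from a specific digit in a given direction (horizontal or vertical)
--     number_str = ""
--     if direction == "horizontal":
--         left_col = col
--         while left_col >= 0 and grid[row][left_col].isdigit():
--             number_str = grid[row][left_col] + number_str
--             left_col -= 1
--
--         right_col = col + 1
--         while right_col < len(grid[0]) and grid[row][right_col].isdigit():
--             number_str += grid[row][right_col]
--             right_col += 1
--
--     elif direction == "vertical":
--         up_row = row
--         while up_row >= 0 and grid[up_row][col].isdigit():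
--             number_str = grid[up_row][col] + number_str
--             up_row -= 1
--
--         down_row = row + 1
--         while down_row < len(grid) and grid[down_row][col].isdigit():
--             number_str += grid[down_row][col]
--             down_row += 1
--
--     return int(number_str) if number_str else None
--
-- def is_gear(grid, row, col):
--     if grid[row][col] != '*':
--         return False, []
--
--     adjacent_numbers = []
--     # Check horizontally and vertically for adjacent numbers
--     for dr, dc, direction in [(-1, 0, "vertical"), (1, 0, "vertical"), (0, -1, "horizontal"), (0, 1, "horizontal")]:
--         adjacent_row, adjacent_col = row + dr, col + dc
--         if 0 <= adjacent_row < len(grid) and 0 <= adjacent_col < len(grid[0]) and grid[adjacent_row][adjacent_col].isdigit():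
--             number = find_full_number(grid, adjacent_row, adjacent_col, direction)
--             if number is not None:
--                 adjacent_numbers.append(number)
--
--     # A gear must be adjacent to exactly two unique numbers
--     return len(set(adjacent_numbers)) == 2, set(adjacent_numbers)
-- ===== SOURCE B (Python) =====
-- def _runs(line):
--     # all maximal digit runs of the line as (start, end, value)
--     runs = []
--     j, n = 0, len(line)
--     while j < n:
--         if line[j].isdigit():
--             k = j + 1
--             while k < n and line[k].isdigit():
--                 k += 1
--             runs.append((j, k, int("".join(line[j:k]))))
--             j = k
--         else:
--             j += 1
--     return runs
--
-- def _value_at(line, i):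
--     # value of the digit run containing index i, if any
--     for s, e, v in _runs(line):
--         if s <= i < e:
--             return v
--     return None
--
-- def is_gear(grid, row, col):
--     if grid[row][col] != '*':
--         return False, []
--     h, w = len(grid), len(grid[0])
--     column = [r[col] for r in grid]
--     row_line = grid[row]
--     vals = []
--     for line, i, ok in ((column, row - 1, 0 <= row - 1 < h and 0 <= col < w),
--                         (column, row + 1, 0 <= row + 1 < h and 0 <= col < w),
--                         (row_line, col - 1, 0 <= row < h and 0 <= col - 1 < w),
--                         (row_line, col + 1, 0 <= row < h and 0 <= col + 1 < w)):
--         if ok and line[i].isdigit():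
--             v = _value_at(line, i)
--             if v is not None and v not in vals:
--                 vals.append(v)
--     return len(vals) == 2, set(vals)
-- ===== Notes on version B (the rewrite author's own statement) =====
-- stated objective: alternative
-- what changed: B drops A's direction-cased outward character walks entirely: it materialises the column once, enumerates every maximal digit run of the whole line (with its int value) in one scan, selects the run whose span contains the neighbour index, and deduplicates on the fly instead of via a final set().
-- outside the precondition, e.g. on is_gear([['*'], ['x'], []], 0, 0): A returns (False, set()), B raises IndexError
import Mathlib
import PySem

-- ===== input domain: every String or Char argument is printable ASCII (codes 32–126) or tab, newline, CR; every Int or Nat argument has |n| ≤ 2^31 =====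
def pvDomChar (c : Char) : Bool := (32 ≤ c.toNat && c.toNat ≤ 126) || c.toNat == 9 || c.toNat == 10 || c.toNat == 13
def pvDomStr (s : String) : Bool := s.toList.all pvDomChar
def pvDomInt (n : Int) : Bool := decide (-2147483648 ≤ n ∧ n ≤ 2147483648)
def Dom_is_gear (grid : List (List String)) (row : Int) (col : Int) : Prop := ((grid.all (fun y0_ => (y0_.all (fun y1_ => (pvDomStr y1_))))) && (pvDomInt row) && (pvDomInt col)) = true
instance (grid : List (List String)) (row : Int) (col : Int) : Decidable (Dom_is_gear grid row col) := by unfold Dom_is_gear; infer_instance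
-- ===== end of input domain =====

-- B replaces A's direction-specific outward digit walks by a whole-line scan over precomputed
-- maximal digit runs (alternative decomposition, similar cost; equivalence proved on Pre_).

-- ===== PORT A =====
-- grid[r][c]; total form of Python's indexing (Pre_ excludes the inputs where Python raises;
-- inner walk accesses are in range whenever they happen under Pre_)
def pvCell (grid : List (List String)) (r c : Int) : String :=
  PySem.List.pyGetD (PySem.List.pyGetD grid r []) c ""

-- the `while left_col >= 0 and ...isdigit()` loop (index decreasing, cells prepended);
-- fuel i.toNat+1 is exactly the iteration bound of the loop
def pvWalkNeg (get : Int → String) : Nat → Int → List Char → List Char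
  | 0, _, acc => acc
  | fuel+1, i, acc =>
    if 0 ≤ i ∧ PySem.Str.strIsdigit (get i) = true then
      pvWalkNeg get fuel (i-1) ((get i).toList ++ acc)
    else acc

-- the `while right_col < bound and ...isdigit()` loop (index increasing, cells appended)
def pvWalkPos (get : Int → String) (bound : Int) : Nat → Int → List Char → List Char
  | 0, _, acc => acc
  | fuel+1, i, acc =>
    if i < bound ∧ PySem.Str.strIsdigit (get i) = true then
      pvWalkPos get bound fuel (i+1) (acc ++ (get i).toList)
    else acc

def find_full_number (grid : List (List String)) (row col : Int) (direction : String) : Option Int :=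
  let number_str : List Char :=
    if direction = "horizontal" then
      let w : Int := ((grid.headD []).length : Int)
      pvWalkPos (fun c => pvCell grid row c) w (w - (col+1)).toNat (col+1)
        (pvWalkNeg (fun c => pvCell grid row c) (col.toNat + 1) col [])
    else if direction = "vertical" then
      let hgt : Int := (grid.length : Int)
      pvWalkPos (fun r => pvCell grid r col) hgt (hgt - (row+1)).toNat (row+1)
        (pvWalkNeg (fun r => pvCell grid r col) (row.toNat + 1) row [])
    else []
  -- int(number_str) if number_str else None; number_str is a (possibly empty) all-digit ASCII
  -- string, on which int() never raises, so the total form .getD 0 is exact (the 0 is dead)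
  if number_str.isEmpty then none
  else some ((PySem.Int.ofChars? number_str).getD 0)

-- the body of A's `for dr, dc, direction in [...]` loop
def is_gearStep (grid : List (List String)) (row col hgt w : Int)
    (acc : List Int) (t : Int × Int × String) : List Int :=
  let ar := row + t.1
  let ac := col + t.2.1
  if (0 ≤ ar ∧ ar < hgt) ∧ (0 ≤ ac ∧ ac < w) ∧
      PySem.Str.strIsdigit (pvCell grid ar ac) = true then
    match find_full_number grid ar ac t.2.2 with
    | some n => acc ++ [n]
    | none => acc
  else acc

def is_gear (grid : List (List String)) (row : Int) (col : Int) : Bool × List Int :=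
  if pvCell grid row col ≠ "*" then (false, [])
  else
    let hgt : Int := (grid.length : Int)
    let w : Int := ((grid.headD []).length : Int)
    let nums := [((-1 : Int), (0 : Int), "vertical"), (1, 0, "vertical"),
                 (0, -1, "horizontal"), (0, 1, "horizontal")].foldl
      (is_gearStep grid row col hgt w) ([] : List Int)
    (decide (PySem.Set.len (PySem.Set.ofList nums) = 2), PySem.Set.ofList nums)

-- ===== PORT B =====
-- inner `while k < n and line[k].isdigit(): k += 1`
def pvRunEnd (line : List String) : Nat → Nat → Nat
  | 0, k => k
  | f+1, k =>
    if k < line.length ∧ PySem.Str.strIsdigit (line.getD k "") = true then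
      pvRunEnd line f (k+1)
    else k

-- int("".join(line[j:k])); a run is a nonempty all-digit ASCII string, on which int() never
-- raises, so the total form .getD 0 is exact (the 0 is dead)
def pvRunVal (line : List String) (j k : Nat) : Int :=
  (PySem.Int.ofChars? (PySem.Chars.join []
    ((PySem.List.slice line (some (j : Int)) (some (k : Int))).map String.toList))).getD 0

-- _runs: scan of all maximal digit runs; fuel line.length is exactly the scan bound
def pvRuns (line : List String) : Nat → Nat → List (Nat × Nat × Int)
  | 0, _ => []
  | f+1, j =>
    if j < line.length then
      if PySem.Str.strIsdigit (line.getD j "") = true then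
        let k := pvRunEnd line (line.length - (j+1)) (j+1)
        (j, k, pvRunVal line j k) :: pvRuns line f k
      else pvRuns line f (j+1)
    else []

-- _value_at: first (unique) run whose span contains i
def pvValueAt (line : List String) (i : Int) : Option Int :=
  ((pvRuns line line.length 0).find?
    (fun t => decide ((t.1 : Int) ≤ i ∧ i < (t.2.1 : Int)))).map (fun t => t.2.2)

-- the body of B's `for line, i, ok in (...)` loop
def is_gear_altStep (vals : List Int) (t : List String × Int × Bool) : List Int :=
  if t.2.2 && PySem.Str.strIsdigit (PySem.List.pyGetD t.1 t.2.1 "") then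
    match pvValueAt t.1 t.2.1 with
    | some v => if vals.contains v then vals else vals ++ [v]
    | none => vals
  else vals

def is_gear_alt (grid : List (List String)) (row : Int) (col : Int) : Bool × List Int :=
  if pvCell grid row col ≠ "*" then (false, [])
  else
    let hgt : Int := (grid.length : Int)
    let w : Int := ((grid.headD []).length : Int)
    let column := grid.map (fun r => PySem.List.pyGetD r col "")
    let rowLine := PySem.List.pyGetD grid row []
    let cands : List (List String × Int × Bool) :=
      [(column, row - 1, decide (0 ≤ row - 1 ∧ row - 1 < hgt ∧ 0 ≤ col ∧ col < w)),
       (column, row + 1, decide (0 ≤ row + 1 ∧ row + 1 < hgt ∧ 0 ≤ col ∧ col < w)),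
       (rowLine, col - 1, decide (0 ≤ row ∧ row < hgt ∧ 0 ≤ col - 1 ∧ col - 1 < w)),
       (rowLine, col + 1, decide (0 ≤ row ∧ row < hgt ∧ 0 ≤ col + 1 ∧ col + 1 < w))]
    let vals := cands.foldl is_gear_altStep ([] : List Int)
    (decide (vals.length = 2), PySem.Set.ofList vals)

-- ===== PRECONDITION & SPEC =====
-- Pre_ excludes (a) row/col out of Python's index range, where A raises IndexError, and
-- (b) non-rectangular grids whose addressed cell is '*', where A's scans across the '*' cell's
-- row and column can raise IndexError mid-walk (and B's column build can too).
def Pre_is_gear (grid : List (List String)) (row : Int) (col : Int) : Prop :=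
  (-(grid.length : Int) ≤ row ∧ row < (grid.length : Int)) ∧
  (-((PySem.List.pyGetD grid row []).length : Int) ≤ col ∧
      col < ((PySem.List.pyGetD grid row []).length : Int)) ∧
  (PySem.List.pyGetD (PySem.List.pyGetD grid row []) col "" = "*" →
      ∀ r ∈ grid, r.length = (grid.headD []).length)
instance (grid : List (List String)) (row : Int) (col : Int) : Decidable (Pre_is_gear grid row col) := by
  unfold Pre_is_gear; infer_instance

def pvWitness_is_gear : List (List String) × Int × Int :=
  ([["4", "6", "7"], [".", "*", "."], ["3", "5", "."]], 1, 1)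

def Spec_is_gear (grid : List (List String)) (row : Int) (col : Int) (out : Bool × List Int) : Prop := out = is_gear_alt grid row col
instance (grid : List (List String)) (row : Int) (col : Int) (out : Bool × List Int) : Decidable (Spec_is_gear grid row col out) := by unfold Spec_is_gear; infer_instance

-- ===== CLAIM (what is proved, stated in full; the proofs are below) =====
def Claim_equal_is_gear : Prop := ∀ (grid : List (List String)) (row : Int) (col : Int), Dom_is_gear grid row col → Pre_is_gear grid row col → Spec_is_gear grid row col (is_gear grid row col)

-- ===== LEMMAS AND PROOFS =====

-- a maximal digit run [j, k) of `line` containing position i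
def pvRunB (line : List String) (j k i : Nat) : Prop :=
  j ≤ i ∧ i < k ∧ k ≤ line.length ∧
  (∀ m, j ≤ m → m < k → PySem.Str.strIsdigit (line.getD m "") = true) ∧
  (j = 0 ∨ PySem.Str.strIsdigit (line.getD (j-1) "") = false) ∧
  (k = line.length ∨ PySem.Str.strIsdigit (line.getD k "") = false)

def pvSeg (line : List String) (j k : Nat) : List String := (line.drop j).take (k - j)

def pvFlat (cells : List String) : List Char := (cells.map String.toList).flatten

lemma pvWalkNeg_succ (get : Int → String) (f : Nat) (i : Int) (acc : List Char) :
    pvWalkNeg get (f+1) i acc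
      = if 0 ≤ i ∧ PySem.Str.strIsdigit (get i) = true then
          pvWalkNeg get f (i-1) ((get i).toList ++ acc)
        else acc := rfl

lemma pvWalkPos_succ (get : Int → String) (bound : Int) (f : Nat) (i : Int) (acc : List Char) :
    pvWalkPos get bound (f+1) i acc
      = if i < bound ∧ PySem.Str.strIsdigit (get i) = true then
          pvWalkPos get bound f (i+1) (acc ++ (get i).toList)
        else acc := rfl

lemma pvRuns_succ (line : List String) (f j : Nat) :
    pvRuns line (f+1) j
      = if j < line.length then
          if PySem.Str.strIsdigit (line.getD j "") = true then
            (j, pvRunEnd line (line.length - (j+1)) (j+1),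
              pvRunVal line j (pvRunEnd line (line.length - (j+1)) (j+1)))
              :: pvRuns line f (pvRunEnd line (line.length - (j+1)) (j+1))
          else pvRuns line f (j+1)
        else [] := rfl

lemma pvRunB_exists {line : List String} {i : Nat} (hi : i < line.length)
    (hd : PySem.Str.strIsdigit (line.getD i "") = true) : ∃ j k, pvRunB line j k i := by
  have L : ∀ i : Nat, i < line.length → PySem.Str.strIsdigit (line.getD i "") = true →
      ∃ j, j ≤ i ∧ (∀ m, j ≤ m → m ≤ i → PySem.Str.strIsdigit (line.getD m "") = true) ∧
        (j = 0 ∨ PySem.Str.strIsdigit (line.getD (j-1) "") = false) := by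
    intro i
    induction i using Nat.strong_induction_on with
    | _ i ih =>
      intro hi' hd'
      match i with
      | 0 =>
        exact ⟨0, le_refl 0, fun m hm hm' => by
          have : m = 0 := by omega
          subst this; exact hd', Or.inl rfl⟩
      | (i'+1) =>
        by_cases hpd : PySem.Str.strIsdigit (line.getD i' "") = true
        · obtain ⟨j, hj1, hj2, hj3⟩ := ih i' (by omega) (by omega) hpd
          refine ⟨j, by omega, ?_, hj3⟩
          intro m hm hm'
          rcases Nat.lt_or_ge m (i'+1) with h | h
          · exact hj2 m hm (by omega)
          · have : m = i'+1 := by omega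
            subst this; exact hd'
        · exact ⟨i'+1, le_refl _, fun m hm hm' => by
            have : m = i'+1 := by omega
            subst this; exact hd', Or.inr (by simpa using Bool.eq_false_iff.mpr hpd)⟩
  have R : ∀ c : Nat, c < line.length → PySem.Str.strIsdigit (line.getD c "") = true →
      ∃ k, c < k ∧ k ≤ line.length ∧
        (∀ m, c ≤ m → m < k → PySem.Str.strIsdigit (line.getD m "") = true) ∧
        (k = line.length ∨ PySem.Str.strIsdigit (line.getD k "") = false) := by
    intro c
    induction hd0 : line.length - (c+1) generalizing c with
    | zero =>
      intro hc hdc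
      refine ⟨c+1, by omega, by omega, fun m hm hm' => ?_, Or.inl (by omega)⟩
      have : m = c := by omega
      subst this; exact hdc
    | succ d ih =>
      intro hc hdc
      by_cases hpd : PySem.Str.strIsdigit (line.getD (c+1) "") = true
      · obtain ⟨k, hk1, hk2, hk3, hk4⟩ := ih (c+1) (by omega) (by omega) hpd
        refine ⟨k, by omega, hk2, fun m hm hm' => ?_, hk4⟩
        rcases Nat.lt_or_ge m (c+1) with h | h
        · have : m = c := by omega
          subst this; exact hdc
        · exact hk3 m h hm'
      · exact ⟨c+1, by omega, by omega, fun m hm hm' => by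
          have : m = c := by omega
          subst this; exact hdc, Or.inr (by simpa using Bool.eq_false_iff.mpr hpd)⟩
  obtain ⟨j, hj1, hj2, hj3⟩ := L i hi hd
  obtain ⟨k, hk1, hk2, hk3, hk4⟩ := R i hi hd
  refine ⟨j, k, hj1, hk1, hk2, ?_, hj3, hk4⟩
  intro m hm hm'
  rcases Nat.lt_or_ge m (i+1) with h | h
  · exact hj2 m hm (by omega)
  · exact hk3 m (by omega) hm'

lemma pvSeg_append {line : List String} {j m k : Nat} (h1 : j ≤ m) (h2 : m ≤ k) :
    pvSeg line j m ++ pvSeg line m k = pvSeg line j k := by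
  have h3 : m - j + (k - m) = k - j := by omega
  have h4 : j + (m - j) = m := by omega
  simp only [pvSeg, ← h3, List.take_add, List.drop_drop, h4]

lemma pvSeg_single {line : List String} {i : Nat} (hi : i < line.length) :
    pvSeg line i (i+1) = [line.getD i ""] := by
  show List.take (i+1-i) (List.drop i line) = _
  rw [show i+1-i = 1 by omega, List.take_one_drop_eq_of_lt_length hi]
  simp [List.getD_eq_getElem?_getD, List.getElem?_eq_getElem hi]

lemma pvFlat_append (a b : List String) : pvFlat (a ++ b) = pvFlat a ++ pvFlat b := by
  simp [pvFlat]

lemma pvWalkNeg_spec {line : List String} {get : Int → String}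
    (HG : ∀ m : Nat, m < line.length → get (m : Int) = line.getD m "") :
    ∀ (i : Nat), i < line.length → ∀ (j : Nat), j ≤ i →
    (∀ m, j ≤ m → m ≤ i → PySem.Str.strIsdigit (line.getD m "") = true) →
    (j = 0 ∨ PySem.Str.strIsdigit (line.getD (j-1) "") = false) →
    ∀ acc, pvWalkNeg get (i+1) (i : Int) acc = pvFlat (pvSeg line j (i+1)) ++ acc := by
  intro i
  induction i with
  | zero =>
    intro hi j hj hdig hbd acc
    have hj0 : j = 0 := by omega
    subst hj0
    have hg := HG 0 hi
    rw [pvWalkNeg_succ]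
    rw [if_pos ⟨le_refl ((0:Nat):Int), by rw [hg]; exact hdig 0 (le_refl 0) (le_refl 0)⟩]
    show (get _).toList ++ acc = _
    rw [hg, pvSeg_single hi]
    simp [pvFlat]
  | succ i ih =>
    intro hi j hj hdig hbd acc
    have hii : i < line.length := by omega
    have hg := HG (i+1) hi
    rw [pvWalkNeg_succ]
    rw [if_pos ⟨by positivity, by rw [hg]; exact hdig (i+1) hj (le_refl _)⟩]
    rw [show ((i+1 : Nat) : Int) - 1 = (i : Int) by push_cast; ring]
    by_cases hji : j ≤ i
    · rw [ih hii j hji (fun m hm hm' => hdig m hm (by omega)) hbd]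
      rw [hg]
      rw [← pvSeg_append (line := line) (j := j) (m := i+1) (k := i+1+1) (by omega) (by omega)]
      rw [pvFlat_append, pvSeg_single hi]
      simp [pvFlat]
    · have hj2 : j = i+1 := by omega
      subst hj2
      rcases hbd with h0 | hnd
      · omega
      · simp only [Nat.add_sub_cancel] at hnd
        rw [pvWalkNeg_succ]
        rw [if_neg]
        · rw [hg, pvSeg_single hi]
          simp [pvFlat]
        · rintro ⟨-, hd2⟩
          rw [HG i hii] at hd2
          rw [hnd] at hd2
          exact absurd hd2 (by simp)

lemma pvWalkPos_spec {line : List String} {get : Int → String}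
    (HG : ∀ m : Nat, m < line.length → get (m : Int) = line.getD m "") :
    ∀ (k c : Nat), c ≤ k → k ≤ line.length →
    (∀ m, c ≤ m → m < k → PySem.Str.strIsdigit (line.getD m "") = true) →
    (k = line.length ∨ PySem.Str.strIsdigit (line.getD k "") = false) →
    ∀ acc, pvWalkPos get (line.length : Int) (line.length - c) (c : Int) acc
      = acc ++ pvFlat (pvSeg line c k) := by
  intro k c hck hkn hdig hbd acc
  induction hd0 : k - c generalizing c acc with
  | zero =>
    have hck' : c = k := by omega
    subst hck'
    by_cases hkn' : c = line.length
    · rw [show line.length - c = 0 by omega]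
      show acc = acc ++ pvFlat (pvSeg line c c)
      simp [pvSeg, pvFlat]
    · rcases hbd with h0 | hnd
      · omega
      · rw [show line.length - c = (line.length - (c+1)) + 1 by omega]
        rw [pvWalkPos_succ]
        rw [if_neg]
        · simp [pvSeg, pvFlat]
        · rintro ⟨-, hd2⟩
          rw [HG c (by omega)] at hd2
          rw [hnd] at hd2
          exact absurd hd2 (by simp)
  | succ d ih =>
    have hck2 : c < k := by omega
    have hcn : c < line.length := by omega
    rw [show line.length - c = (line.length - (c+1)) + 1 by omega]
    rw [pvWalkPos_succ]
    rw [if_pos ⟨by exact_mod_cast hcn, by rw [HG c hcn]; exact hdig c (le_refl c) hck2⟩]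
    rw [show ((c : Nat) : Int) + 1 = ((c+1 : Nat) : Int) by push_cast; ring]
    rw [ih (c+1) (by omega) (fun m hm hm' => hdig m (by omega) hm') _ (by omega)]
    rw [HG c hcn]
    rw [← pvSeg_append (line := line) (j := c) (m := c+1) (k := k) (by omega) (by omega)]
    rw [pvFlat_append, pvSeg_single hcn]
    simp [pvFlat]

lemma pvRunEnd_spec {line : List String} :
    ∀ (k c : Nat), c ≤ k → k ≤ line.length →
    (∀ m, c ≤ m → m < k → PySem.Str.strIsdigit (line.getD m "") = true) →
    (k = line.length ∨ PySem.Str.strIsdigit (line.getD k "") = false) →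
    pvRunEnd line (line.length - c) c = k := by
  intro k c hck hkn hdig hbd
  induction hd : k - c generalizing c with
  | zero =>
    have hck' : c = k := by omega
    subst hck'
    by_cases hkn' : c = line.length
    · have : line.length - c = 0 := by omega
      rw [this]; rfl
    · have h1 : line.length - c = (line.length - (c+1)) + 1 := by omega
      rw [h1]
      simp only [pvRunEnd]
      rw [if_neg]
      rintro ⟨-, hd2⟩
      rcases hbd with rfl | hnd
      · omega
      · rw [hnd] at hd2; exact absurd hd2 (by simp)
  | succ d ih =>
    have hck2 : c < k := by omega
    have h1 : line.length - c = (line.length - (c+1)) + 1 := by omega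
    rw [h1]
    simp only [pvRunEnd]
    rw [if_pos ⟨by omega, hdig c (le_refl c) hck2⟩]
    exact ih (c+1) (by omega) (fun m hm hm' => hdig m (by omega) hm') (by omega)

lemma pvRunEnd_ge (line : List String) : ∀ f c, c ≤ pvRunEnd line f c := by
  intro f
  induction f with
  | zero => intro c; simp [pvRunEnd]
  | succ f ih =>
    intro c
    simp only [pvRunEnd]
    split
    · exact le_trans (Nat.le_succ c) (ih (c+1))
    · exact le_refl c

lemma pvRuns_fuel (line : List String) :
    ∀ f f' j, line.length - j ≤ f → line.length - j ≤ f' →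
    pvRuns line f j = pvRuns line f' j := by
  intro f
  induction f with
  | zero =>
    intro f' j hf hf'
    have hj : line.length ≤ j := by omega
    cases f' with
    | zero => rfl
    | succ f'' =>
      simp only [pvRuns]
      rw [if_neg (by omega)]
  | succ f ih =>
    intro f' j hf hf'
    by_cases hj : j < line.length
    · cases f' with
      | zero => omega
      | succ f'' =>
        simp only [pvRuns]
        rw [if_pos hj, if_pos hj]
        by_cases hdg : PySem.Str.strIsdigit (line.getD j "") = true
        · rw [if_pos hdg, if_pos hdg]
          have hge := pvRunEnd_ge line (line.length - (j+1)) (j+1)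
          congr 1
          exact ih f'' _ (by omega) (by omega)
        · rw [if_neg hdg, if_neg hdg]
          exact ih f'' (j+1) (by omega) (by omega)
    · simp only [pvRuns]
      rw [if_neg hj]
      cases f'' : f' with
      | zero => rfl
      | succ g =>
        simp only [pvRuns]
        rw [if_neg hj]

lemma pvRuns_find {line : List String} {i j k : Nat} (hrun : pvRunB line j k i) :
    ∀ jj, jj ≤ j →
    (pvRuns line (line.length - jj) jj).find?
        (fun t => decide ((t.1 : Int) ≤ (i : Int) ∧ (i : Int) < (t.2.1 : Int)))
      = some (j, k, pvRunVal line j k) := by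
  obtain ⟨h1, h2, h3, h4, h5, h6⟩ := hrun
  intro jj hjj
  induction hd0 : j - jj using Nat.strong_induction_on generalizing jj with
  | _ d ih =>
    by_cases hjje : jj = j
    · subst hjje
      have hjn : jj < line.length := by omega
      rw [show line.length - jj = (line.length - (jj+1)) + 1 by omega, pvRuns_succ]
      rw [if_pos hjn, if_pos (h4 jj (le_refl jj) (by omega))]
      have hke : pvRunEnd line (line.length - (jj+1)) (jj+1) = k :=
        pvRunEnd_spec k (jj+1) (by omega) h3 (fun m hm hm' => h4 m (by omega) hm') h6
      rw [hke]
      rw [List.find?_cons_of_pos]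
      simp only [decide_eq_true_eq]
      constructor
      · exact_mod_cast h1
      · exact_mod_cast h2
    · have hjjlt : jj < j := by omega
      have hjn : jj < line.length := by omega
      rw [show line.length - jj = (line.length - (jj+1)) + 1 by omega, pvRuns_succ]
      rw [if_pos hjn]
      by_cases hdg : PySem.Str.strIsdigit (line.getD jj "") = true
      · rw [if_pos hdg]
        obtain ⟨j2, k2, hr2⟩ := pvRunB_exists hjn hdg
        obtain ⟨g1, g2, g3, g4, g5, g6⟩ := hr2
        have hk2j : k2 ≤ j := by
          by_contra hcon
          rcases h5 with rfl | hnd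
          · omega
          · have hdj := g4 (j-1) (by omega) (by omega)
            rw [hnd] at hdj
            exact absurd hdj (by simp)
        have hke : pvRunEnd line (line.length - (jj+1)) (jj+1) = k2 :=
          pvRunEnd_spec k2 (jj+1) (by omega) g3 (fun m hm hm' => g4 m (by omega) hm') g6
        rw [hke]
        rw [List.find?_cons_of_neg]
        · rw [pvRuns_fuel line (line.length - (jj+1)) (line.length - k2) k2 (by omega) (le_refl _)]
          exact ih (j - k2) (by omega) k2 (by omega) rfl
        · show ¬ decide ((jj : Int) ≤ (i : Int) ∧ (i : Int) < (k2 : Int)) = true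
          simp only [decide_eq_true_eq]
          rintro ⟨-, hlt⟩
          exact absurd (show i < k2 by exact_mod_cast hlt) (by omega)
      · rw [if_neg hdg]
        exact ih (j - (jj+1)) (by omega) (jj+1) (by omega) rfl

lemma pvDig_toList_ne {s : String} (h : PySem.Str.strIsdigit s = true) : s.toList ≠ [] := by
  intro h'
  simp [PySem.Str.strIsdigit, PySem.Chars.strIsdigit, h'] at h

lemma pvJoin_nil_flatten (parts : List (List Char)) :
    PySem.Chars.join [] parts = parts.flatten := by
  simp only [PySem.Chars.join, List.intercalate]
  induction parts with
  | nil => rfl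
  | cons p ps ih =>
    cases ps with
    | nil => rfl
    | cons q qs => simp_all [List.intersperse]

lemma pvRunVal_eq {line : List String} {j k : Nat} :
    pvRunVal line j k = (PySem.Int.ofChars? (pvFlat (pvSeg line j k))).getD 0 := by
  simp [pvRunVal, pvJoin_nil_flatten, PySem.List.slice_natCast, pvFlat, pvSeg]

-- the core: A's two walks produce exactly the run value that B's scan selects
lemma pvCore {line : List String} {get : Int → String}
    (HG : ∀ m : Nat, m < line.length → get (m : Int) = line.getD m "")
    {i : Nat} (hi : i < line.length)
    (hd : PySem.Str.strIsdigit (line.getD i "") = true) :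
    (if (pvWalkPos get (line.length : Int) (line.length - (i+1)) ((i : Int)+1)
          (pvWalkNeg get (i+1) (i : Int) [])).isEmpty then none
     else some ((PySem.Int.ofChars? (pvWalkPos get (line.length : Int) (line.length - (i+1))
          ((i : Int)+1) (pvWalkNeg get (i+1) (i : Int) []))).getD 0))
      = pvValueAt line (i : Int) := by
  obtain ⟨j, k, hrun⟩ := pvRunB_exists hi hd
  obtain ⟨h1, h2, h3, h4, h5, h6⟩ := hrun
  have hneg := pvWalkNeg_spec HG i hi j h1 (fun m hm hm' => h4 m hm (by omega)) h5 []
  have hpos := pvWalkPos_spec HG k (i+1) (by omega) h3 (fun m hm hm' => h4 m (by omega) hm') h6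
      (pvFlat (pvSeg line j (i+1)) ++ [])
  rw [show ((i : Int) + 1) = ((i+1 : Nat) : Int) by push_cast; ring]
  rw [hneg, hpos]
  have hs : (pvFlat (pvSeg line j (i+1)) ++ []) ++ pvFlat (pvSeg line (i+1) k)
      = pvFlat (pvSeg line j k) := by
    rw [List.append_nil, ← pvFlat_append, pvSeg_append (by omega) (by omega)]
  rw [hs]
  have hdecomp : pvSeg line j k = pvSeg line j i ++ ([line.getD i ""] ++ pvSeg line (i+1) k) := by
    rw [← pvSeg_single hi, pvSeg_append (line := line) (j := i) (m := i+1) (k := k) (by omega) (by omega),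
        pvSeg_append (line := line) (j := j) (m := i) (k := k) (by omega) (by omega)]
  have hne : pvFlat (pvSeg line j k) ≠ [] := by
    intro hnil
    rw [hdecomp, pvFlat_append, pvFlat_append] at hnil
    simp only [List.append_eq_nil_iff] at hnil
    have : (line.getD i "").toList = [] := by
      have := hnil.2.1
      simpa [pvFlat] using this
    exact pvDig_toList_ne hd this
  rw [if_neg (by simp [List.isEmpty_iff]; exact hne)]
  have hfind := pvRuns_find ⟨h1, h2, h3, h4, h5, h6⟩ 0 (by omega)
  rw [show line.length - 0 = line.length by omega] at hfind
  unfold pvValueAt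
  rw [hfind]
  simp [pvRunVal_eq]

lemma pvCell_col (grid : List (List String)) (col r : Int) :
    pvCell grid r col = PySem.List.pyGetD (grid.map (fun ro => PySem.List.pyGetD ro col "")) r "" := by
  have h0 : PySem.List.pyGetD ([] : List String) col "" = "" := by
    simp [PySem.List.pyGetD, PySem.List.pyGet?]
  have h1 := (PySem.List.pyGetD_map (fun ro => PySem.List.pyGetD ro col "") grid r []).symm
  simp only [h0] at h1
  exact h1

-- per-direction equality, vertical
lemma pvDirV {grid : List (List String)} {col ar : Int}
    (hb : 0 ≤ ar ∧ ar < (grid.length : Int))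
    (hdg : PySem.Str.strIsdigit
      (PySem.List.pyGetD (grid.map (fun r => PySem.List.pyGetD r col "")) ar "") = true) :
    find_full_number grid ar col "vertical"
      = pvValueAt (grid.map (fun r => PySem.List.pyGetD r col "")) ar := by
  obtain ⟨i, rfl⟩ : ∃ i : Nat, ar = (i : Int) := ⟨ar.toNat, (Int.toNat_of_nonneg hb.1).symm⟩
  have hcl : (grid.map (fun r => PySem.List.pyGetD r col "")).length = grid.length := by simp
  have hi : i < (grid.map (fun r => PySem.List.pyGetD r col "")).length := by
    rw [hcl]; exact_mod_cast hb.2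
  have HG : ∀ m : Nat, m < (grid.map (fun r => PySem.List.pyGetD r col "")).length →
      pvCell grid (m : Int) col = (grid.map (fun r => PySem.List.pyGetD r col "")).getD m "" := by
    intro m hm
    rw [pvCell_col grid col (m : Int), PySem.List.pyGetD_natCast]
  have hd : PySem.Str.strIsdigit ((grid.map (fun r => PySem.List.pyGetD r col "")).getD i "") = true := by
    rw [← PySem.List.pyGetD_natCast (grid.map (fun r => PySem.List.pyGetD r col "")) i ""]
    exact hdg
  have hcore := pvCore (get := fun r => pvCell grid r col) HG hi hd
  simp only [find_full_number]
  simp only [if_true]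
  simp only [Int.toNat_natCast]
  rw [show (((grid.length : Int)) - ((i : Int)+1)).toNat = grid.length - (i+1) by omega]
  rw [show (grid.length : Int) = ((grid.map (fun r => PySem.List.pyGetD r col "")).length : Int) by rw [hcl]]
  rw [show grid.length = (grid.map (fun r => PySem.List.pyGetD r col "")).length from hcl.symm]
  exact hcore

-- per-direction equality, horizontal
lemma pvDirH {grid : List (List String)} {row ac : Int}
    (hrect : ∀ r ∈ grid, r.length = (grid.headD []).length)
    (hrow : 0 ≤ row ∧ row < (grid.length : Int))
    (hb : 0 ≤ ac ∧ ac < ((grid.headD []).length : Int))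
    (hdg : PySem.Str.strIsdigit
      (PySem.List.pyGetD (PySem.List.pyGetD grid row []) ac "") = true) :
    find_full_number grid row ac "horizontal"
      = pvValueAt (PySem.List.pyGetD grid row []) ac := by
  have hg : PySem.List.pyGetD grid row [] = grid[row.toNat] :=
    PySem.List.pyGetD_eq_getElem grid [] hrow.1 hrow.2
  have hw : (PySem.List.pyGetD grid row []).length = (grid.headD []).length := by
    rw [hg]; exact hrect _ (List.getElem_mem _)
  obtain ⟨i, rfl⟩ : ∃ i : Nat, ac = (i : Int) := ⟨ac.toNat, (Int.toNat_of_nonneg hb.1).symm⟩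
  have hi : i < (PySem.List.pyGetD grid row []).length := by
    rw [hw]; exact_mod_cast hb.2
  have HG : ∀ m : Nat, m < (PySem.List.pyGetD grid row []).length →
      pvCell grid row (m : Int) = (PySem.List.pyGetD grid row []).getD m "" := by
    intro m hm
    show PySem.List.pyGetD (PySem.List.pyGetD grid row []) (m : Int) "" = _
    rw [PySem.List.pyGetD_natCast]
  have hd : PySem.Str.strIsdigit ((PySem.List.pyGetD grid row []).getD i "") = true := by
    rw [← PySem.List.pyGetD_natCast (PySem.List.pyGetD grid row []) i ""]
    exact hdg
  have hcore := pvCore (get := fun c => pvCell grid row c) HG hi hd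
  simp only [find_full_number]
  simp only [if_true]
  simp only [Int.toNat_natCast]
  rw [show (((grid.headD []).length : Int)) - ((i : Int)+1) = ((PySem.List.pyGetD grid row []).length : Int) - ((i : Int)+1) by rw [hw]]
  rw [show ((grid.headD []).length : Int) = ((PySem.List.pyGetD grid row []).length : Int) by rw [hw]]
  rw [show (((PySem.List.pyGetD grid row []).length : Int) - ((i : Int)+1)).toNat = (PySem.List.pyGetD grid row []).length - (i+1) by omega]
  exact hcore

lemma pvStepA (acc : List Int) (G : Prop) [Decidable G] (o : Option Int) :
    (if G then (match o with | some nn => acc ++ [nn] | none => acc) else acc)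
      = acc ++ (if G then o.toList else []) := by
  split_ifs <;> cases o <;> simp

lemma pvStepB (acc : List Int) (b : Bool) (o : Option Int) :
    (if b then (match o with
                | some v => if acc.contains v then acc else acc ++ [v]
                | none => acc) else acc)
      = List.foldl PySem.Set.add acc (if b then o.toList else []) := by
  cases b <;> cases o <;>
    simp [PySem.Set.add, PySem.Set.contains, List.foldl]

def pvOptA (grid : List (List String)) (row col hgt w : Int) (t : Int × Int × String) : List Int :=
  if (0 ≤ row + t.1 ∧ row + t.1 < hgt) ∧ (0 ≤ col + t.2.1 ∧ col + t.2.1 < w) ∧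
      PySem.Str.strIsdigit (pvCell grid (row + t.1) (col + t.2.1)) = true then
    (find_full_number grid (row + t.1) (col + t.2.1) t.2.2).toList
  else []

def pvOptB (t : List String × Int × Bool) : List Int :=
  if t.2.2 && PySem.Str.strIsdigit (PySem.List.pyGetD t.1 t.2.1 "") then
    (pvValueAt t.1 t.2.1).toList
  else []

lemma pvFoldA (grid : List (List String)) (row col hgt w : Int) :
    ∀ (l : List (Int × Int × String)) (acc : List Int),
    List.foldl (is_gearStep grid row col hgt w) acc l
      = acc ++ l.flatMap (pvOptA grid row col hgt w) := by
  intro l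
  induction l with
  | nil => intro acc; simp
  | cons t l ih =>
    intro acc
    rw [List.foldl_cons, ih, List.flatMap_cons, ← List.append_assoc]
    congr 1
    exact pvStepA acc _ _

lemma pvFoldB :
    ∀ (l : List (List String × Int × Bool)) (acc : List Int),
    List.foldl is_gear_altStep acc l
      = List.foldl PySem.Set.add acc (l.flatMap pvOptB) := by
  intro l
  induction l with
  | nil => intro acc; simp
  | cons t l ih =>
    intro acc
    rw [List.foldl_cons, ih, List.flatMap_cons, List.foldl_append]
    congr 1
    exact pvStepB acc _ _

-- ===== VERDICT (by name: the statement is the Claim_ definition above) =====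
theorem is_gear_spec : Claim_equal_is_gear := by
  unfold Claim_equal_is_gear
  intro grid row col hdom hpre
  unfold Spec_is_gear
  by_cases hc : pvCell grid row col = "*"
  · have hrect : ∀ r ∈ grid, r.length = (grid.headD []).length := hpre.2.2 hc
    simp only [is_gear, is_gear_alt]
    rw [if_neg (by simp [hc]), if_neg (by simp [hc])]
    rw [pvFoldA, pvFoldB]
    simp only [List.flatMap_cons, List.flatMap_nil, List.append_nil, List.nil_append]
    have e1 : pvOptA grid row col (grid.length : Int) ((grid.headD []).length : Int)
          ((-1 : Int), (0 : Int), "vertical")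
        = pvOptB (grid.map (fun r => PySem.List.pyGetD r col ""), row - 1,
            decide (0 ≤ row - 1 ∧ row - 1 < (grid.length : Int) ∧
              0 ≤ col ∧ col < ((grid.headD []).length : Int))) := by
      unfold pvOptA pvOptB
      dsimp only
      rw [show row + ((-1 : Int)) = row - 1 by ring, show col + (0 : Int) = col by ring]
      by_cases hbnd : 0 ≤ row - 1 ∧ row - 1 < (grid.length : Int) ∧
          0 ≤ col ∧ col < ((grid.headD []).length : Int)
      · obtain ⟨u1, u2, u3, u4⟩ := hbnd
        have hcv : PySem.Str.strIsdigit (pvCell grid (row - 1) col)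
            = PySem.Str.strIsdigit (PySem.List.pyGetD
                (grid.map (fun r => PySem.List.pyGetD r col "")) (row - 1) "") := by
          rw [pvCell_col grid col (row - 1)]
        by_cases hdg : PySem.Str.strIsdigit (PySem.List.pyGetD
            (grid.map (fun r => PySem.List.pyGetD r col "")) (row - 1) "") = true
        · rw [if_pos ⟨⟨u1, u2⟩, ⟨u3, u4⟩, by rw [hcv]; exact hdg⟩,
            if_pos (by rw [decide_eq_true ⟨u1, u2, u3, u4⟩, Bool.true_and]; exact hdg)]
          rw [pvDirV ⟨u1, u2⟩ hdg]
        · rw [if_neg (fun hcon => hdg (by rw [← hcv]; exact hcon.2.2)),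
            if_neg (by intro hcon; rw [Bool.and_eq_true] at hcon; exact hdg hcon.2)]
      · rw [if_neg (fun hcon => hbnd ⟨hcon.1.1, hcon.1.2, hcon.2.1.1, hcon.2.1.2⟩),
          if_neg (by intro hcon; rw [Bool.and_eq_true] at hcon; exact hbnd (of_decide_eq_true hcon.1))]
    have e2 : pvOptA grid row col (grid.length : Int) ((grid.headD []).length : Int)
          ((1 : Int), (0 : Int), "vertical")
        = pvOptB (grid.map (fun r => PySem.List.pyGetD r col ""), row + 1,
            decide (0 ≤ row + 1 ∧ row + 1 < (grid.length : Int) ∧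
              0 ≤ col ∧ col < ((grid.headD []).length : Int))) := by
      unfold pvOptA pvOptB
      dsimp only
      rw [show row + ((1 : Int)) = row + 1 by ring, show col + (0 : Int) = col by ring]
      by_cases hbnd : 0 ≤ row + 1 ∧ row + 1 < (grid.length : Int) ∧
          0 ≤ col ∧ col < ((grid.headD []).length : Int)
      · obtain ⟨u1, u2, u3, u4⟩ := hbnd
        have hcv : PySem.Str.strIsdigit (pvCell grid (row + 1) col)
            = PySem.Str.strIsdigit (PySem.List.pyGetD
                (grid.map (fun r => PySem.List.pyGetD r col "")) (row + 1) "") := by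
          rw [pvCell_col grid col (row + 1)]
        by_cases hdg : PySem.Str.strIsdigit (PySem.List.pyGetD
            (grid.map (fun r => PySem.List.pyGetD r col "")) (row + 1) "") = true
        · rw [if_pos ⟨⟨u1, u2⟩, ⟨u3, u4⟩, by rw [hcv]; exact hdg⟩,
            if_pos (by rw [decide_eq_true ⟨u1, u2, u3, u4⟩, Bool.true_and]; exact hdg)]
          rw [pvDirV ⟨u1, u2⟩ hdg]
        · rw [if_neg (fun hcon => hdg (by rw [← hcv]; exact hcon.2.2)),
            if_neg (by intro hcon; rw [Bool.and_eq_true] at hcon; exact hdg hcon.2)]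
      · rw [if_neg (fun hcon => hbnd ⟨hcon.1.1, hcon.1.2, hcon.2.1.1, hcon.2.1.2⟩),
          if_neg (by intro hcon; rw [Bool.and_eq_true] at hcon; exact hbnd (of_decide_eq_true hcon.1))]
    have e3 : pvOptA grid row col (grid.length : Int) ((grid.headD []).length : Int)
          ((0 : Int), (-1 : Int), "horizontal")
        = pvOptB (PySem.List.pyGetD grid row [], col - 1,
            decide (0 ≤ row ∧ row < (grid.length : Int) ∧
              0 ≤ col - 1 ∧ col - 1 < ((grid.headD []).length : Int))) := by
      unfold pvOptA pvOptB
      dsimp only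
      rw [show row + (0 : Int) = row by ring, show col + (-1 : Int) = col - 1 by ring]
      by_cases hbnd : 0 ≤ row ∧ row < (grid.length : Int) ∧
          0 ≤ col - 1 ∧ col - 1 < ((grid.headD []).length : Int)
      · obtain ⟨u1, u2, u3, u4⟩ := hbnd
        by_cases hdg : PySem.Str.strIsdigit
            (PySem.List.pyGetD (PySem.List.pyGetD grid row []) (col - 1) "") = true
        · rw [if_pos ⟨⟨u1, u2⟩, ⟨u3, u4⟩, hdg⟩,
            if_pos (by rw [decide_eq_true ⟨u1, u2, u3, u4⟩, Bool.true_and]; exact hdg)]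
          rw [pvDirH hrect ⟨u1, u2⟩ ⟨u3, u4⟩ hdg]
        · rw [if_neg (fun hcon => hdg hcon.2.2),
            if_neg (by intro hcon; rw [Bool.and_eq_true] at hcon; exact hdg hcon.2)]
      · rw [if_neg (fun hcon => hbnd ⟨hcon.1.1, hcon.1.2, hcon.2.1.1, hcon.2.1.2⟩),
          if_neg (by intro hcon; rw [Bool.and_eq_true] at hcon; exact hbnd (of_decide_eq_true hcon.1))]
    have e4 : pvOptA grid row col (grid.length : Int) ((grid.headD []).length : Int)
          ((0 : Int), (1 : Int), "horizontal")
        = pvOptB (PySem.List.pyGetD grid row [], col + 1,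
            decide (0 ≤ row ∧ row < (grid.length : Int) ∧
              0 ≤ col + 1 ∧ col + 1 < ((grid.headD []).length : Int))) := by
      unfold pvOptA pvOptB
      dsimp only
      rw [show row + (0 : Int) = row by ring]
      by_cases hbnd : 0 ≤ row ∧ row < (grid.length : Int) ∧
          0 ≤ col + 1 ∧ col + 1 < ((grid.headD []).length : Int)
      · obtain ⟨u1, u2, u3, u4⟩ := hbnd
        by_cases hdg : PySem.Str.strIsdigit
            (PySem.List.pyGetD (PySem.List.pyGetD grid row []) (col + 1) "") = true
        · rw [if_pos ⟨⟨u1, u2⟩, ⟨u3, u4⟩, hdg⟩,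
            if_pos (by rw [decide_eq_true ⟨u1, u2, u3, u4⟩, Bool.true_and]; exact hdg)]
          rw [pvDirH hrect ⟨u1, u2⟩ ⟨u3, u4⟩ hdg]
        · rw [if_neg (fun hcon => hdg hcon.2.2),
            if_neg (by intro hcon; rw [Bool.and_eq_true] at hcon; exact hdg hcon.2)]
      · rw [if_neg (fun hcon => hbnd ⟨hcon.1.1, hcon.1.2, hcon.2.1.1, hcon.2.1.2⟩),
          if_neg (by intro hcon; rw [Bool.and_eq_true] at hcon; exact hbnd (of_decide_eq_true hcon.1))]
    rw [e1, e2, e3, e4, ← PySem.Set.ofList_eq_foldl, PySem.Set.ofList_ofList]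
    refine congrArg₂ Prod.mk ?_ rfl
    apply decide_eq_decide.mpr
    unfold PySem.Set.len
    exact ⟨fun h => by exact_mod_cast h, fun h => by exact_mod_cast h⟩
  · simp [is_gear, is_gear_alt, hc]
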